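-- pv_equiv track=rewrite | github.com/otakaran/otakaran.github.io | scripts/water.py | select_list_item
-- ===== SOURCE A (Python) =====
-- def select_list_item(list, pos):
--     search_index = 0
--     selected_item = ""
--     for item in list:
--         if search_index == pos:
--             selected_item = item
--         search_index += 1
--     return str(selected_item)
-- ===== SOURCE B (Python) =====
-- def select_list_item(list, pos):
--     return str(list[pos]) if 0 <= pos < len(list) else ""
-- ===== Notes on version B (the rewrite author's own statement) =====
-- stated objective: simpler
-- what changed: Replaced the O(n) counting loop with a single bounds-checked direct index (0 <= pos < len), eliminating the counter and the scan.
import Mathlib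
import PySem

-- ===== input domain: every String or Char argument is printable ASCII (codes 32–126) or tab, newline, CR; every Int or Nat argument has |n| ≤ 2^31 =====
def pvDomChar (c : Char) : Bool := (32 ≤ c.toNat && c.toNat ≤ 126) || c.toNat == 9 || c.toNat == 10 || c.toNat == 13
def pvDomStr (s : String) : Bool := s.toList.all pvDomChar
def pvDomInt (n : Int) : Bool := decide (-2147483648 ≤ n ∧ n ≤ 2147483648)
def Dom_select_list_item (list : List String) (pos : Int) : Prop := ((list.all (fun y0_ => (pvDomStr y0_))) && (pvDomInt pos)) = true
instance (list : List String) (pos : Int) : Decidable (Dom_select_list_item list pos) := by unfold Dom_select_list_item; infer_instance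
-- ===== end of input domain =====

-- B replaces A's counting loop with one bounds-checked direct index; objective: simpler.


-- ===== PORT A =====
-- literal port: fold carrying (search_index, selected_item); str(item) is identity on strings
def select_list_item (list : List String) (pos : Int) : String :=
  (list.foldl (fun (st : Int × String) item =>
    (st.1 + 1, if st.1 == pos then item else st.2)) (0, "")).2

-- ===== PORT B =====
def select_list_item_alt (list : List String) (pos : Int) : String :=
  if 0 ≤ pos ∧ pos < (list.length : Int) then list.getD pos.toNat "" else ""

-- ===== PRECONDITION & SPEC =====
def Spec_select_list_item (list : List String) (pos : Int) (out : String) : Prop := out = select_list_item_alt list pos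
instance (list : List String) (pos : Int) (out : String) : Decidable (Spec_select_list_item list pos out) := by unfold Spec_select_list_item; infer_instance

-- ===== CLAIM (what is proved, stated in full; the proofs are below) =====
def Claim_equal_select_list_item : Prop := ∀ (list : List String) (pos : Int), Dom_select_list_item list pos → Spec_select_list_item list pos (select_list_item list pos)

-- ===== LEMMAS AND PROOFS =====

-- A's loop, started at counter i with accumulator acc, yields the element at
-- offset (pos - i) when i ≤ pos < i + length, and acc otherwise.
theorem foldl_select (l : List String) (pos i : Int) (acc : String) :
    (l.foldl (fun (st : Int × String) item =>
      (st.1 + 1, if st.1 == pos then item else st.2)) (i, acc)).2 =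
    if i ≤ pos ∧ pos < i + (l.length : Int) then l.getD (pos - i).toNat "" else acc := by
  induction l generalizing i acc with
  | nil => simp
  | cons x xs ih =>
    simp only [List.foldl_cons, ih, List.length_cons]
    by_cases hx : i = pos
    · subst hx
      have h1 : ¬ i + 1 ≤ i := by omega
      have h2 : i ≤ i ∧ i < i + ((xs.length : Int) + 1) := by omega
      simp [h1, h2]
    · have hne : (i == pos) = false := by simp [hx]
      simp only [hne, Bool.false_eq_true, if_false]
      split_ifs with h h'
      · have h3 : (pos - i).toNat = (pos - (i + 1)).toNat + 1 := by omega
        simp [h3]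
      · omega
      · omega
      · rfl

-- ===== VERDICT (by name: the statement is the Claim_ definition above) =====
theorem select_list_item_spec : Claim_equal_select_list_item := by
  intro list pos _
  unfold Spec_select_list_item select_list_item select_list_item_alt
  rw [foldl_select]
  by_cases h : 0 ≤ pos ∧ pos < (list.length : Int)
  · have h' : (0:Int) ≤ pos ∧ pos < 0 + (list.length : Int) := by omega
    simp [h, h']
  · have h' : ¬ ((0:Int) ≤ pos ∧ pos < 0 + (list.length : Int)) := by omega
    simp [h, h']
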